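-- pv_equiv track=rewrite | github.com/sidb95/code-problems | codeforces/virtual/913/B.py | calcAnswer
-- ===== SOURCE A (Python) =====
-- def calcAnswer(s, a, n, c):
--     itr = 0
--     ptr = 0
--     while (itr < n):
--         while ((itr < n) and (a[itr] != c)):
--             itr += 1
--         ptr = itr
--         while ((ptr >= 0 and ptr < n) and (a[ptr] == c or a[ptr] == '-')):
--             ptr -= 1
--         if (ptr >= 0 and ptr < n):
--             a[ptr] = '-'
--         #
--         itr += 1
--     #
--     return a
-- ===== SOURCE B (Python) =====
-- def calcAnswer(s, a, n, c):
--     # one left-to-right pass: stack of still-available indices; the nearest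
--     # available slot left of a c-occurrence is the stack top
--     stack = []
--     for i in range(n):
--         x = a[i]
--         if x == c:
--             if stack:
--                 a[stack.pop()] = '-'
--         elif x != '-':
--             stack.append(i)
--     return a
-- ===== Notes on version B (the rewrite author's own statement) =====
-- stated objective: alternative
-- what changed: B replaces A's per-occurrence leftward re-scan over already-marked cells by a single left-to-right pass keeping a stack of still-available indices, popping the stack top (the nearest available slot on the left) at each occurrence of c.
import Mathlib
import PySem

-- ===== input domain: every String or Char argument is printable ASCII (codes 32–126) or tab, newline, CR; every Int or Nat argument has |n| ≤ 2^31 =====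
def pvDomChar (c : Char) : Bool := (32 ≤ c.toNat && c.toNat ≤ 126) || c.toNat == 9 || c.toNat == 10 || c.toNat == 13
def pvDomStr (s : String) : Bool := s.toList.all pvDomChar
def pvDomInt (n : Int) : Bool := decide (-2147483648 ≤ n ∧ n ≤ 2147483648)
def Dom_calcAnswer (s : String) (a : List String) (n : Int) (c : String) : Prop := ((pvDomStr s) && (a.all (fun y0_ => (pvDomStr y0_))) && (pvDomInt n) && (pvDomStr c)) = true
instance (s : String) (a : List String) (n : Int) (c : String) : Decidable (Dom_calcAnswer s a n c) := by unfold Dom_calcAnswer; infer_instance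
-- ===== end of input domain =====

-- B replaces A's per-occurrence re-scan to the left by a single pass with a stack
-- of still-available indices (objective: alternative algorithm). Both Pythons
-- mutate `a` in place identically; the equivalence proved is about the return value.

-- ===== PORT A =====

-- a[i] for i ≥ 0 known in range (every access in A/B is guarded); exact there
def pvIdx (a : List String) (i : Int) : String := a.getD i.toNat ""

-- inner `while itr < n and a[itr] != c: itr += 1`
def scanNextA (a : List String) (n : Int) (c : String) (itr : Int) : Int :=
  if itr < n ∧ pvIdx a itr ≠ c then scanNextA a n c (itr + 1) else itr
termination_by (n - itr).toNat
decreasing_by omega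

-- inner `while (ptr >= 0 and ptr < n) and (a[ptr] == c or a[ptr] == '-'): ptr -= 1`
def scanLeftA (a : List String) (n : Int) (c : String) (ptr : Int) : Int :=
  if (0 ≤ ptr ∧ ptr < n) ∧ (pvIdx a ptr = c ∨ pvIdx a ptr = "-") then
    scanLeftA a n c (ptr - 1)
  else ptr
termination_by (ptr + 1).toNat
decreasing_by omega

theorem scanNextA_ge (a : List String) (n : Int) (c : String) (itr : Int) :
    itr ≤ scanNextA a n c itr := by
  unfold scanNextA
  split
  · have := scanNextA_ge a n c (itr + 1)
    omega
  · omega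
termination_by (n - itr).toNat
decreasing_by omega

-- outer `while itr < n`
def loopA (a : List String) (n : Int) (c : String) (itr : Int) : List String :=
  if h : itr < n then
    let i2 := scanNextA a n c itr
    let p := scanLeftA a n c i2
    let a' := if 0 ≤ p ∧ p < n then a.set p.toNat "-" else a
    loopA a' n c (i2 + 1)
  else a
termination_by (n - itr).toNat
decreasing_by
  have := scanNextA_ge a n c itr
  omega

def calcAnswer (s : String) (a : List String) (n : Int) (c : String) : List String :=
  loopA a n c 0

-- ===== PORT B =====

-- stack is kept top-first (Python's append/pop at the end = cons/head here)
def loopB (a : List String) (stack : List Int) (n : Int) (c : String) (i : Int) : List String :=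
  if h : i < n then
    let x := pvIdx a i
    if x = c then
      match stack with
      | [] => loopB a [] n c (i + 1)
      | j :: rest => loopB (a.set j.toNat "-") rest n c (i + 1)
    else if x ≠ "-" then loopB a (i :: stack) n c (i + 1)
    else loopB a stack n c (i + 1)
  else a
termination_by (n - i).toNat
decreasing_by all_goals omega

def calcAnswer_alt (s : String) (a : List String) (n : Int) (c : String) : List String :=
  loopB a [] n c 0

-- ===== PRECONDITION & SPEC =====
-- A raises IndexError whenever n exceeds len(a); Pre_ excludes exactly those inputs.
def Pre_calcAnswer (s : String) (a : List String) (n : Int) (c : String) : Prop :=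
  n ≤ (a.length : Int)
instance (s : String) (a : List String) (n : Int) (c : String) : Decidable (Pre_calcAnswer s a n c) := by unfold Pre_calcAnswer; infer_instance

def pvWitness_calcAnswer : String × List String × Int × String := ("", ["x", "b", "y", "b"], 4, "b")

def Spec_calcAnswer (s : String) (a : List String) (n : Int) (c : String) (out : List String) : Prop := out = calcAnswer_alt s a n c
instance (s : String) (a : List String) (n : Int) (c : String) (out : List String) : Decidable (Spec_calcAnswer s a n c out) := by unfold Spec_calcAnswer; infer_instance

-- ===== CLAIM (what is proved, stated in full; the proofs are below) =====
def Claim_equal_calcAnswer : Prop := ∀ (s : String) (a : List String) (n : Int) (c : String), Dom_calcAnswer s a n c → Pre_calcAnswer s a n c → Spec_calcAnswer s a n c (calcAnswer s a n c)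

-- ===== LEMMAS AND PROOFS =====

-- available indices below k (original values ≠ c and ≠ '-', not yet marked), largest first
def availN (a : List String) (c : String) : Nat → List Int
  | 0 => []
  | k + 1 =>
    if pvIdx a (k : Int) ≠ c ∧ pvIdx a (k : Int) ≠ "-" then
      ((k : Int)) :: availN a c k
    else availN a c k

theorem availN_mem_lt {a : List String} {c : String} {k : Nat} {x : Int}
    (h : x ∈ availN a c k) : 0 ≤ x ∧ x < (k : Int) := by
  induction k with
  | zero => simp [availN] at h
  | succ k ih =>
    simp only [availN] at h
    split at h
    · rcases List.mem_cons.1 h with h | h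
      · subst h; constructor <;> omega
      · have := ih h; omega
    · have := ih h; omega

theorem scanLeftA_eq (a : List String) (n : Int) (c : String) :
    ∀ (k : Nat) (p : Int), p + 1 = (k : Int) → p < n →
      scanLeftA a n c p = (availN a c k).headD (-1) := by
  intro k
  induction k with
  | zero =>
    intro p hp _
    have hp' : p = -1 := by omega
    subst hp'
    rw [scanLeftA]
    simp [availN]
  | succ k ih =>
    intro p hp hpn
    have hp' : p = (k : Int) := by omega
    rw [scanLeftA]
    by_cases hok : pvIdx a p ≠ c ∧ pvIdx a p ≠ "-"
    · rw [if_neg (by tauto)]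
      subst hp'
      simp [availN, hok.1, hok.2]
    · have hcond : (0 ≤ p ∧ p < n) ∧ (pvIdx a p = c ∨ pvIdx a p = "-") := by
        constructor
        · constructor <;> omega
        · by_cases h1 : pvIdx a p = c
          · exact Or.inl h1
          · exact Or.inr (by tauto)
      rw [if_pos hcond]
      have := ih (p - 1) (by omega) (by omega)
      rw [this]
      subst hp'
      simp only [availN]
      rw [if_neg hok]

theorem pvIdx_set (a : List String) (v : String) (j : Nat) (i : Int)
    (hj : j < a.length) (hi : 0 ≤ i) :
    pvIdx (a.set j v) i = if i = (j : Int) then v else pvIdx a i := by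
  by_cases hij : i = (j : Int)
  · rw [if_pos hij]
    have hji : i.toNat = j := by omega
    simp [pvIdx, List.getD, hji, hj]
  · rw [if_neg hij]
    have hji : ¬ j = i.toNat := by omega
    simp [pvIdx, List.getD, hji]

theorem availN_set (a : List String) (c : String) (j : Int)
    (hj0 : 0 ≤ j) (hjl : j < (a.length : Int)) :
    ∀ k, availN (a.set j.toNat "-") c k = (availN a c k).filter (fun x => decide (x ≠ j)) := by
  intro k
  induction k with
  | zero => simp [availN]
  | succ k ih =>
    have hset := pvIdx_set a "-" j.toNat (k : Int) (by omega) (by omega)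
    rw [Int.toNat_of_nonneg hj0] at hset
    by_cases hkj : (k : Int) = j
    · have hval : pvIdx (a.set j.toNat "-") (k : Int) = "-" := by
        rw [hset, if_pos hkj]
      simp only [availN, hval]
      rw [if_neg (by simp), ih]
      split
      · simp only [List.filter_cons]
        rw [if_neg (by simp [hkj])]
      · rfl
    · have hval : pvIdx (a.set j.toNat "-") (k : Int) = pvIdx a (k : Int) := by
        rw [hset, if_neg hkj]
      simp only [availN, hval]
      split
      · simp only [List.filter_cons]
        rw [if_pos (by simp [hkj]), ih]
      · exact ih

theorem availN_filter_head {a : List String} {c : String} {k : Nat} {j : Int} {rest : List Int}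
    (h : availN a c k = j :: rest) :
    (availN a c k).filter (fun x => decide (x ≠ j)) = rest := by
  have hnd : (availN a c k).Pairwise (fun x y => y < x) := by
    clear h
    induction k with
    | zero => simp [availN]
    | succ k ih =>
      simp only [availN]
      split
      · exact List.Pairwise.cons (fun x hx => (availN_mem_lt hx).2) ih
      · exact ih
  rw [h] at hnd ⊢
  simp only [List.filter_cons, decide_not]
  rw [if_neg (by simp)]
  apply List.filter_eq_self.2
  intro x hx
  have := (List.pairwise_cons.1 hnd).1 x hx
  simp
  omega

theorem scanNextA_hit (a : List String) (n : Int) (c : String) (itr : Int)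
    (h : pvIdx a itr = c) : scanNextA a n c itr = itr := by
  rw [scanNextA]
  simp [h]

theorem loopA_skip (a : List String) (n : Int) (c : String) (itr : Int)
    (hlt : itr < n) (hne : pvIdx a itr ≠ c) :
    loopA a n c itr = loopA a n c (itr + 1) := by
  have hsn : scanNextA a n c itr = scanNextA a n c (itr + 1) := by
    rw [scanNextA]; rw [if_pos ⟨hlt, hne⟩]
  by_cases h1 : itr + 1 < n
  · conv_lhs => rw [loopA]
    conv_rhs => rw [loopA]
    rw [dif_pos hlt, dif_pos h1, hsn]
  · have hn : itr + 1 = n := by omega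
    have hsn2 : scanNextA a n c (itr + 1) = itr + 1 := by
      rw [scanNextA, if_neg (fun h => absurd h.1 (by omega))]
    have hsl : scanLeftA a n c (itr + 1) = itr + 1 := by
      rw [scanLeftA, if_neg (fun h => absurd h.1.2 (by omega))]
    conv_lhs => rw [loopA]
    conv_rhs => rw [loopA]
    rw [dif_pos hlt, dif_neg (show ¬ itr + 1 < n by omega)]
    simp only [hsn, hsn2, hsl]
    rw [if_neg (show ¬ (0 ≤ itr + 1 ∧ itr + 1 < n) by omega)]
    rw [loopA, dif_neg (show ¬ itr + 1 + 1 < n by omega)]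

theorem loop_main (n : Int) (c : String) :
    ∀ (k : Nat) (itr : Int) (a : List String), 0 ≤ itr → n ≤ (a.length : Int) →
      (n - itr).toNat = k → loopA a n c itr = loopB a (availN a c itr.toNat) n c itr := by
  intro k
  induction k with
  | zero =>
    intro itr a h0 hlen hk
    have hge : ¬ itr < n := by omega
    rw [loopA, dif_neg hge, loopB.eq_def, dif_neg hge]
  | succ k ih =>
    intro itr a h0 hlen hk
    have hlt : itr < n := by omega
    have hcast : ((itr.toNat : Int)) = itr := Int.toNat_of_nonneg h0
    have hsucc : (itr + 1).toNat = itr.toNat + 1 := by omega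
    by_cases hc : pvIdx a itr = c
    · -- occurrence of c at itr
      have hstep : availN a c (itr.toNat + 1) = availN a c itr.toNat := by
        simp only [availN, hcast]
        rw [if_neg (by tauto)]
      have hsl : scanLeftA a n c itr = (availN a c itr.toNat).headD (-1) := by
        rw [scanLeftA_eq a n c (itr.toNat + 1) itr (by omega) hlt, hstep]
      rw [loopA, dif_pos hlt, loopB.eq_def, dif_pos hlt]
      simp only [scanNextA_hit a n c itr hc, if_pos hc]
      cases hst : availN a c itr.toNat with
      | nil =>
        rw [hst] at hsl
        simp only [hsl, List.headD]
        rw [if_neg (by omega)]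
        have := ih (itr + 1) a (by omega) hlen (by omega)
        rw [this, hsucc, hstep, hst]
      | cons j rest =>
        have hj : 0 ≤ j ∧ j < itr := by
          have := availN_mem_lt (a := a) (c := c) (k := itr.toNat) (x := j)
            (by rw [hst]; exact List.mem_cons_self ..)
          omega
        rw [hst] at hsl
        simp only [hsl, List.headD]
        rw [if_pos (by omega)]
        have hjl : j < (a.length : Int) := by omega
        have hlen' : n ≤ ((a.set j.toNat "-").length : Int) := by
          rw [List.length_set]; exact hlen
        have := ih (itr + 1) (a.set j.toNat "-") (by omega) hlen' (by omega)
        rw [this, hsucc]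
        have hne : pvIdx (a.set j.toNat "-") (itr.toNat : Int) = c := by
          rw [pvIdx_set a "-" j.toNat (itr.toNat : Int) (by omega) (by omega)]
          rw [if_neg (by omega), hcast]; exact hc
        have : availN (a.set j.toNat "-") c (itr.toNat + 1)
            = availN (a.set j.toNat "-") c itr.toNat := by
          simp only [availN]
          rw [if_neg (by tauto)]
        rw [this, availN_set a c j hj.1 hjl, availN_filter_head hst]
    · -- no occurrence at itr
      rw [loopA_skip a n c itr hlt hc, loopB.eq_def, dif_pos hlt]
      simp only [if_neg hc]
      have hih := ih (itr + 1) a (by omega) hlen (by omega)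
      by_cases hd : pvIdx a itr = "-"
      · rw [if_neg (by simp [hd])]
        have : availN a c (itr.toNat + 1) = availN a c itr.toNat := by
          simp only [availN, hcast]
          rw [if_neg (by tauto)]
        rw [hih, hsucc, this]
      · rw [if_pos (by simp [hd])]
        have : availN a c (itr.toNat + 1) = itr :: availN a c itr.toNat := by
          simp only [availN, hcast]
          rw [if_pos ⟨hc, hd⟩]
        rw [hih, hsucc, this]

-- ===== VERDICT (by name: the statement is the Claim_ definition above) =====
theorem calcAnswer_spec : Claim_equal_calcAnswer := by
  intro s a n c _ hpre
  unfold Spec_calcAnswer calcAnswer calcAnswer_alt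
  have := loop_main n c (n - 0).toNat 0 a (by omega) hpre rfl
  simpa [availN] using this
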